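-- pv_equiv track=rewrite | github.com/EduardoGallego94/codewars | codewars-solutions/string_reverse_slicing_101.py | reverse_slice
-- ===== SOURCE A (Python) =====
-- def reverse_slice(s): #Ej. 'abcde'
-- 	longitud = len(s) #5
-- 	count=0
-- 	lista=[]
-- 	corte=longitud-1 #4
-- 	while count < longitud: #0<5-1
-- 		lista.append(s[corte::-1])
-- 		count+=1 #1
-- 		corte-=1 #3
-- 		continue
-- 	return lista
-- ===== SOURCE B (Python) =====
-- def reverse_slice(s):
--     # Build each reversed prefix incrementally by prepending the next character
--     # to the previous one (no slicing), shortest first, then flip the list.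
--     out = []
--     cur = ""
--     for ch in s:
--         cur = ch + cur
--         out.append(cur)
--     out.reverse()
--     return out
-- ===== Notes on version B (the rewrite author's own statement) =====
-- stated objective: alternative
-- what changed: A re-slices a reversed prefix of s at every step; B never slices: it builds each reversed prefix incrementally by prepending one character to the previous reversed prefix, collects them shortest-first, and reverses the collected list once at the end.
import Mathlib
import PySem

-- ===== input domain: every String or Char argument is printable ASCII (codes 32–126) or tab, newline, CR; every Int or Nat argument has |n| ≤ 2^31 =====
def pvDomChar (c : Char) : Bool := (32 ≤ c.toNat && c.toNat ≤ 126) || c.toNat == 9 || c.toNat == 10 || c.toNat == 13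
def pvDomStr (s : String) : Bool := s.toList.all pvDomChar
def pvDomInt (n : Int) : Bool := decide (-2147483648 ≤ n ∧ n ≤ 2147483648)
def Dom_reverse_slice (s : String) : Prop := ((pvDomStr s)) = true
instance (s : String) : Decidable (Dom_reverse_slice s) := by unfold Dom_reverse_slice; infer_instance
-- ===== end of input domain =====

-- B never slices: it builds each reversed prefix incrementally by prepending one character
-- to the previous reversed prefix, collects them shortest-first, and reverses the list once
-- at the end (objective: alternative algorithm).


-- ===== PORT A =====
-- the while loop: state (count, corte, lista); terminates since longitud - count shrinks
def reverseSliceLoop (s : String) (longitud count corte : Int) (lista : List String) : List String :=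
  if _h : count < longitud then
    reverseSliceLoop s longitud (count + 1) (corte - 1)
      (lista ++ [(PySem.Str.slice? s (some corte) none (-1)).getD ""])
  else lista
termination_by (longitud - count).toNat
decreasing_by omega

def reverse_slice (s : String) : List String :=
  let longitud := PySem.Str.len s
  let corte := longitud - 1
  reverseSliceLoop s longitud 0 corte []

-- ===== PORT B =====
-- one step of B's for loop: cur = ch + cur; out.append(cur)
def revSliceStep (st : String × List String) (ch : Char) : String × List String :=
  let cur := String.ofList (ch :: st.1.toList)
  (cur, st.2 ++ [cur])

def reverse_slice_alt (s : String) : List String :=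
  let r := s.toList.foldl revSliceStep ("", [])
  r.2.reverse

-- ===== PRECONDITION & SPEC =====
def Spec_reverse_slice (s : String) (out : List String) : Prop := out = reverse_slice_alt s
instance (s : String) (out : List String) : Decidable (Spec_reverse_slice s out) := by unfold Spec_reverse_slice; infer_instance

-- ===== CLAIM (what is proved, stated in full; the proofs are below) =====
def Claim_equal_reverse_slice : Prop := ∀ (s : String), Dom_reverse_slice s → Spec_reverse_slice s (reverse_slice s)

-- ===== LEMMAS AND PROOFS =====

-- A's per-step slice: xs[c::-1] is the reverse of the (c+1)-prefix
theorem slice?_start_neg_one {α : Type} (xs : List α) (c : Nat) (hc : c < xs.length) :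
    PySem.List.slice? xs (some (c : Int)) none (-1) = some ((xs.take (c + 1)).reverse) := by
  simp only [PySem.List.slice?, PySem.List.sliceIndices]
  norm_num
  have h1 : min (c : Int) ((xs.length : Int) - 1) = (c : Int) := by omega
  simp only [if_neg (show ¬((c:Int) < 0) by omega), h1, if_pos (show (-1:Int) < (c:Int) by omega)]
  have hcnt : ((c : Int) + 1).toNat = c + 1 := by omega
  rw [hcnt]
  have key : ∀ m : Nat, m ≤ c + 1 →
      List.filterMap (fun (x : ℕ) => xs[((c:Int) + -(x:Int)).toNat]?) (List.range m)
        = ((xs.take (c+1)).reverse).take m := by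
    intro m hm
    induction m with
    | zero => simp
    | succ k ih =>
      rw [List.range_succ, List.filterMap_append, ih (by omega)]
      have hk : ((c:Int) + -(k:Int)).toNat = c - k := by omega
      have hidx : c - k < xs.length := by omega
      have hlen : (xs.take (c+1)).reverse.length = c + 1 := by
        simp [List.length_take]; omega
      generalize hL : (xs.take (c+1)).reverse = L at *
      rw [List.take_succ]
      have : L[k]? = some (xs[c - k]'hidx) := by
        subst hL
        rw [List.getElem?_eq_getElem (by omega)]
        congr 1
        rw [List.getElem_reverse, List.getElem_take]
        congr 1
        simp [List.length_take]
        omega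
      rw [this]
      simp [hk, List.getElem?_eq_getElem hidx]
  have := key (c+1) (le_refl _)
  rw [this, List.take_of_length_le (by simp)]

-- unroll A's loop into a map over the remaining range
theorem reverseSliceLoop_eq (s : String) (n count : Int) (acc : List String) (h0 : 0 ≤ count) :
    reverseSliceLoop s n count (n - 1 - count) acc =
      acc ++ (PySem.List.pyRange count n 1).map
        (fun i => (PySem.Str.slice? s (some (n - 1 - i)) none (-1)).getD "") := by
  by_cases h : count < n
  · rw [reverseSliceLoop, dif_pos h]
    have hr : n - 1 - count - 1 = n - 1 - (count + 1) := by omega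
    rw [hr, reverseSliceLoop_eq s n (count + 1) _ (by omega)]
    rw [PySem.List.pyRange_one_cons h]
    simp
  · rw [reverseSliceLoop, dif_neg h, PySem.List.pyRange_one_eq_nil (by omega)]
    simp
termination_by (n - count).toNat
decreasing_by omega

-- invariant of B's fold: cur is the reverse of the consumed part (prepended to the initial cur),
-- out collects the reversed prefixes shortest-first
theorem foldl_revSliceStep (l : List Char) (c : List Char) (o : List String) :
    l.foldl revSliceStep (String.ofList c, o) =
      (String.ofList (l.reverse ++ c),
       o ++ (List.range l.length).map (fun m => String.ofList ((l.take (m+1)).reverse ++ c))) := by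
  induction l generalizing c o with
  | nil => simp
  | cons ch t ih =>
    simp only [List.foldl_cons, revSliceStep, String.toList_ofList]
    rw [ih (ch :: c) (o ++ [String.ofList (ch :: c)])]
    simp only [Prod.mk.injEq]
    constructor
    · simp
    · rw [List.length_cons, List.range_succ_eq_map, List.map_cons, List.map_map]
      simp [List.append_assoc]

-- reversing a map over range N re-indexes by N-1-j
theorem rev_map_range {α : Type} (g : Nat → α) (N : Nat) :
    ((List.range N).map g).reverse = (List.range N).map (fun j => g (N - 1 - j)) := by
  apply List.ext_getElem
  · simp
  · intro j h1 h2
    simp only [List.length_reverse, List.length_map, List.length_range] at h1 h2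
    rw [List.getElem_reverse, List.getElem_map, List.getElem_range, List.getElem_map,
        List.getElem_range]
    simp only [List.length_map, List.length_range]

-- ===== VERDICT (by name: the statement is the Claim_ definition above) =====
theorem reverse_slice_spec : Claim_equal_reverse_slice := by
  intro s _
  unfold Spec_reverse_slice reverse_slice reverse_slice_alt
  dsimp only
  have h0 : PySem.Str.len s - 1 = PySem.Str.len s - 1 - 0 := by omega
  rw [h0, reverseSliceLoop_eq s (PySem.Str.len s) 0 [] (le_refl 0), List.nil_append]
  have hb : ("" : String) = String.ofList [] := rfl
  rw [hb, foldl_revSliceStep s.toList [] []]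
  dsimp only
  rw [List.nil_append]
  set N := s.toList.length with hN
  have hlen : PySem.Str.len s = (N : Int) := by simp [PySem.Str.len, hN]
  rw [hlen, PySem.List.pyRange_one, List.map_map]
  have hNt : (((N : Int)) - 0).toNat = N := by omega
  rw [hNt]
  have hA : (List.range N).map
      ((fun i => (PySem.Str.slice? s (some ((N : Int) - 1 - i)) none (-1)).getD "") ∘
        fun k : Nat => ((0 : Int) + (k : Int))) =
      (List.range N).map (fun k => String.ofList ((s.toList.take (N - k)).reverse)) := by
    apply List.map_congr_left
    intro k hk
    have hkN : k < N := List.mem_range.mp hk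
    simp only [Function.comp]
    have hc : ((N : Int) - 1 - ((0 : Int) + (k : Int))) = (((N - 1 - k : Nat) : Nat) : Int) := by
      omega
    rw [hc, PySem.Str.slice?, PySem.Chars.slice?_eq_listSlice?,
        slice?_start_neg_one s.toList (N - 1 - k) (by omega)]
    simp only [Option.map_some, Option.getD_some]
    have he : N - 1 - k + 1 = N - k := by omega
    rw [he]
  rw [hA]
  have hB : (List.range N).map (fun m => String.ofList ((s.toList.take (m + 1)).reverse ++ [])) =
      (List.range N).map (fun m => String.ofList ((s.toList.take (m + 1)).reverse)) := by
    simp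
  rw [hB, rev_map_range]
  apply List.map_congr_left
  intro j hj
  have hjN : j < N := List.mem_range.mp hj
  have he : N - 1 - j + 1 = N - j := by omega
  rw [he]
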